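-- pv_equiv track=rewrite | github.com/MrBrantCode/unitest_baseline | mut_generate/mist_train_cf/cf_10550/solution.py | get_next_prime_fibonacci
-- ===== SOURCE A (Python) =====
-- def get_next_prime_fibonacci(n):
--     def is_prime(num):
--         if num <= 1:
--             return False
--         for i in range(2, int(num**0.5) + 1):
--             if num % i == 0:
--                 return False
--         return True
--
--     def is_fibonacci(num):
--         a, b = 0, 1
--         while b < num:
--             a, b = b, a + b
--         return b == num
--
--     num = n + 1
--     while True:
--         if is_fibonacci(num) and is_prime(num):
--             return num
--         num += 1
-- ===== SOURCE B (Python) =====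
-- def get_next_prime_fibonacci(n):
--     # Faster: walk the Fibonacci sequence itself (it is increasing), returning
--     # the first Fibonacci number above n that is prime, instead of testing
--     # every integer above n for being Fibonacci.
--     def is_prime(num):
--         if num < 2:
--             return False
--         i = 2
--         while i * i <= num:
--             if num % i == 0:
--                 return False
--             i += 1
--         return True
--
--     a, b = 1, 2
--     while True:
--         if b > n and is_prime(b):
--             return b
--         a, b = b, a + b
-- ===== Notes on version B (the rewrite author's own statement) =====
-- stated objective: faster
-- what changed: Instead of scanning every integer above n and testing each for being Fibonacci and prime, B walks the (increasing) Fibonacci sequence itself and returns the first Fibonacci number above n that passes a primality test.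
import Mathlib
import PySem

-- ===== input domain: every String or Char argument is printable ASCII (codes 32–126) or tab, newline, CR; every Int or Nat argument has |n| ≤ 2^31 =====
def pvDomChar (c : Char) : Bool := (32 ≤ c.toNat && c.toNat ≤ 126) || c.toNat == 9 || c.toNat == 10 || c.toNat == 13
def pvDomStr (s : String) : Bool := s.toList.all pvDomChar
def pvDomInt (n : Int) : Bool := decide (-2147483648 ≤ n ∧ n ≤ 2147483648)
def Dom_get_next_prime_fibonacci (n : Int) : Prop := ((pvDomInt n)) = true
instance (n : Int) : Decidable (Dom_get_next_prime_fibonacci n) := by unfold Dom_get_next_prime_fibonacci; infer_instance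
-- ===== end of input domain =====

set_option maxRecDepth 20000
set_option maxHeartbeats 4000000


-- B walks the Fibonacci sequence itself and returns the first Fibonacci number
-- above n that is prime, instead of A's scan of every integer above n; faster.

-- ===== PORT A =====
-- int(num**0.5): for every value this port tests (≤ ~5·10^9 ≪ 2^52) the
-- correctly rounded double sqrt truncates to the integer square root, except
-- possibly isqrt+1 when num is just below a perfect square — and that extra
-- trial divisor can never divide num, so the ported range end is exact.
def pvSqrtA (num : Int) : Int := ((Nat.sqrt num.toNat : Nat) : Int)

-- the for-loop 'for i in range(2, int(num**0.5) + 1)': i counts up from 2,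
-- one fuel unit per range element (fuel = length of the range)
def forPrimeA (num : Int) : Nat → Int → Bool
  | 0, _ => true
  | f+1, i => if PySem.Int.mod num i == 0 then false else forPrimeA num f (i + 1)

def isPrimeA (num : Int) : Bool :=
  if num ≤ 1 then false
  else forPrimeA num ((pvSqrtA num + 1) - 2).toNat 2

def fibLoopA : Nat → Int → Int → Int → Bool
  | 0, _, b, num => b == num            -- fuel guard only; the fuel below always suffices
  | f+1, a, b, num => if b < num then fibLoopA f b (a + b) num else b == num

def isFibA (num : Int) : Bool := fibLoopA (num.toNat + 2) 0 1 num

def passA (num : Int) : Bool := isFibA num && isPrimeA num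

def scanA : Nat → Int → Int
  | 0, _ => 0                           -- fuel guard only; never reached on Dom (proved below)
  | f+1, num => if passA num = true then num else scanA f (num + 1)

def get_next_prime_fibonacci (n : Int) : Int := scanA 8589934592 (n + 1)

-- ===== PORT B =====
def primeLoopB (num : Int) : Nat → Int → Bool
  | 0, _ => true                        -- fuel guard only; the fuel below always suffices
  | f+1, i =>
      if i * i ≤ num then
        (if PySem.Int.mod num i == 0 then false else primeLoopB num f (i + 1))
      else true

def isPrimeB (num : Int) : Bool := if num < 2 then false else primeLoopB num num.toNat 2

def fibScanB : Nat → Int → Int → Int → Int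
  | 0, _, _, _ => 0                     -- fuel guard only; never reached on Dom (proved below)
  | f+1, n, a, b => if decide (n < b) && isPrimeB b then b else fibScanB f n b (a + b)

def get_next_prime_fibonacci_alt (n : Int) : Int := fibScanB 64 n 1 2

-- ===== PRECONDITION & SPEC =====
def Spec_get_next_prime_fibonacci (n : Int) (out : Int) : Prop := out = get_next_prime_fibonacci_alt n
instance (n : Int) (out : Int) : Decidable (Spec_get_next_prime_fibonacci n out) := by unfold Spec_get_next_prime_fibonacci; infer_instance

-- ===== CLAIM (what is proved, stated in full; the proofs are below) =====
def Claim_equal_get_next_prime_fibonacci : Prop := ∀ (n : Int), Dom_get_next_prime_fibonacci n → Spec_get_next_prime_fibonacci n (get_next_prime_fibonacci n)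

-- ===== LEMMAS AND PROOFS =====

-- the Fibonacci step, iterated: st k (a, b) is (a, b) after k steps of (a, b) ↦ (b, a+b)
def st : Nat → Int × Int → Int × Int
  | 0, p => p
  | k+1, p => st k (p.2, p.1 + p.2)

-- the ten Fibonacci primes below 2971215073
def FP : List Int := [2, 3, 5, 13, 89, 233, 1597, 28657, 514229, 433494437]

-- the first Fibonacci prime strictly above n, for n ≤ 2^31
def firstFP (n : Int) : Int :=
  if n < 2 then 2 else if n < 3 then 3 else if n < 5 then 5 else if n < 13 then 13
  else if n < 89 then 89 else if n < 233 then 233 else if n < 1597 then 1597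
  else if n < 28657 then 28657 else if n < 514229 then 514229
  else if n < 433494437 then 433494437 else 2971215073

-- balanced (logarithmic-depth) check that no d with lo ≤ d < lo + cnt divides num;
-- evidence for the primality of the large targets that `decide` can evaluate
def noDiv : Nat → Int → Nat → Nat → Bool
  | 0, _, _, cnt => cnt == 0
  | f+1, num, lo, cnt =>
      if cnt == 0 then true
      else if cnt == 1 then !(PySem.Int.mod num (lo : Int) == 0)
      else noDiv f num lo (cnt / 2) && noDiv f num (lo + cnt / 2) (cnt - cnt / 2)

theorem noDiv_sound (num : Int) : ∀ (f : Nat) (lo cnt : Nat), noDiv f num lo cnt = true →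
    ∀ d : Int, (lo : Int) ≤ d → d < (lo : Int) + (cnt : Int) → PySem.Int.mod num d ≠ 0 := by
  intro f
  induction f with
  | zero =>
      intro lo cnt h d hd1 hd2
      have : cnt = 0 := by simpa [noDiv] using h
      omega
  | succ f ih =>
      intro lo cnt h d hd1 hd2
      by_cases h0 : cnt = 0
      · omega
      · by_cases h1 : cnt = 1
        · subst h1
          have hd : d = (lo : Int) := by omega
          rw [noDiv, if_neg (by simpa using h0), if_pos (by simp)] at h
          simpa [hd] using h
        · rw [noDiv, if_neg (by simpa using h0), if_neg (by simpa using h1),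
            Bool.and_eq_true] at h
          by_cases hsplit : d < (lo : Int) + ((cnt / 2 : Nat) : Int)
          · exact ih lo (cnt / 2) h.1 d hd1 hsplit
          · exact ih (lo + cnt / 2) (cnt - cnt / 2) h.2 d (by push_cast at *; omega)
              (by push_cast at *; omega)

theorem forPrimeA_true (num : Int) : ∀ (f : Nat) (i : Int),
    (∀ d : Int, i ≤ d → d < i + f → PySem.Int.mod num d ≠ 0) → forPrimeA num f i = true := by
  intro f
  induction f with
  | zero => intro i _; rfl
  | succ f ih =>
      intro i h
      rw [forPrimeA, if_neg (by simp only [beq_iff_eq]; exact h i le_rfl (by push_cast; omega))]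
      exact ih (i + 1) (fun d hd1 hd2 => h d (by omega) (by push_cast at *; omega))

theorem forPrimeA_false (num : Int) : ∀ (f : Nat) (i d : Int), i ≤ d → d < i + f →
    PySem.Int.mod num d = 0 → forPrimeA num f i = false := by
  intro f
  induction f with
  | zero => intro i d h1 h2 _; exfalso; push_cast at h2; omega
  | succ f ih =>
      intro i d h1 h2 hm
      by_cases hi : (PySem.Int.mod num i == 0) = true
      · rw [forPrimeA, if_pos hi]
      · have hne : i ≠ d := fun he => hi (by rw [he]; simpa using hm)
        rw [forPrimeA, if_neg hi]
        exact ih (i + 1) d (by omega) (by push_cast at *; omega) hm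

theorem isPrimeA_true_of_noDiv (num : Int) (cnt : Nat) (h2 : 2 ≤ num)
    (hub : num < ((2 + cnt : Nat) : Int) * ((2 + cnt : Nat) : Int))
    (hnd : noDiv 64 num 2 cnt = true) : isPrimeA num = true := by
  have hs : Nat.sqrt num.toNat < 2 + cnt := by
    apply Nat.sqrt_lt'.mpr
    have : ((num.toNat : Int)) < ((2 + cnt : Nat) : Int) * ((2 + cnt : Nat) : Int) := by
      rw [Int.toNat_of_nonneg (by omega)]; exact hub
    have h' : num.toNat < (2 + cnt) * (2 + cnt) := by exact_mod_cast this
    calc num.toNat < (2 + cnt) * (2 + cnt) := h'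
      _ = (2 + cnt) ^ 2 := (sq (2 + cnt)).symm
  unfold isPrimeA
  rw [if_neg (by omega)]
  apply forPrimeA_true
  intro d hd1 hd2
  apply noDiv_sound num 64 2 cnt hnd d (by push_cast; omega)
  unfold pvSqrtA at hd2
  push_cast at hd2 ⊢
  omega

theorem isPrimeA_composite (num d : Int) (h2 : 2 ≤ d) (hd : d * d ≤ num)
    (hm : PySem.Int.mod num d = 0) : isPrimeA num = false := by
  have h4 : 4 ≤ num := le_trans (by nlinarith) hd
  unfold isPrimeA
  rw [if_neg (by omega)]
  apply forPrimeA_false num _ 2 d h2 _ hm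
  have hds : d.toNat ≤ Nat.sqrt num.toNat := Nat.le_sqrt.mpr (by
    have h0 : (0 : Int) ≤ d := by omega
    have : (d.toNat : Int) * (d.toNat : Int) ≤ (num.toNat : Int) := by
      rw [Int.toNat_of_nonneg h0, Int.toNat_of_nonneg (by omega)]; exact hd
    exact_mod_cast this)
  have hdt : (d.toNat : Int) = d := Int.toNat_of_nonneg (by omega)
  have hds' : (d.toNat : Int) ≤ ((Nat.sqrt num.toNat : Nat) : Int) := by exact_mod_cast hds
  unfold pvSqrtA
  omega

theorem passA_of (t : Int) (h1 : isFibA t = true) (h2 : isPrimeA t = true) : passA t = true := by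
  unfold passA; rw [h1, h2]; rfl

theorem passA_false_of_comp (num d : Int) (h2 : 2 ≤ d) (hd : d * d ≤ num)
    (hm : PySem.Int.mod num d = 0) : ¬ passA num = true := by
  unfold passA
  rw [isPrimeA_composite num d h2 hd hm]
  simp

theorem primeLoopB_true (num : Int) : ∀ (f : Nat) (i : Int),
    (∀ d : Int, i ≤ d → d * d ≤ num → PySem.Int.mod num d ≠ 0) → primeLoopB num f i = true := by
  intro f
  induction f with
  | zero => intro i _; rfl
  | succ f ih =>
      intro i h
      by_cases hii : i * i ≤ num
      · rw [primeLoopB, if_pos hii, if_neg (by simp only [beq_iff_eq]; exact h i le_rfl hii)]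
        exact ih (i + 1) (fun d hd1 hd2 => h d (by omega) hd2)
      · rw [primeLoopB, if_neg hii]

theorem primeLoopB_false (num : Int) : ∀ (f : Nat) (i d : Int), 0 ≤ i → i ≤ d →
    (d - i).toNat < f → d * d ≤ num → PySem.Int.mod num d = 0 → primeLoopB num f i = false := by
  intro f
  induction f with
  | zero => intro i d _ _ h3 _ _; omega
  | succ f ih =>
      intro i d h0 h1 h3 hdd hm
      have hii : i * i ≤ num := le_trans (by nlinarith) hdd
      rw [primeLoopB, if_pos hii]
      by_cases hi : (PySem.Int.mod num i == 0) = true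
      · rw [if_pos hi]
      · have hne : i ≠ d := fun he => hi (by rw [he]; simpa using hm)
        rw [if_neg hi]
        exact ih (i + 1) d (by omega) (by omega) (by omega) hdd hm

theorem isPrimeB_true_of_noDiv (num : Int) (cnt : Nat) (h2 : 2 ≤ num)
    (hsq : num < ((2 + cnt : Nat) : Int) * ((2 + cnt : Nat) : Int))
    (hnd : noDiv 64 num 2 cnt = true) : isPrimeB num = true := by
  unfold isPrimeB
  rw [if_neg (by omega)]
  apply primeLoopB_true
  intro d hd1 hdd
  apply noDiv_sound num 64 2 cnt hnd d (by push_cast; omega)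
  by_contra hge
  push_neg at hge
  have : ((2 + cnt : Nat) : Int) * ((2 + cnt : Nat) : Int) ≤ d * d := by
    have hc : ((2 + cnt : Nat) : Int) ≤ d := by push_cast at *; omega
    have hc0 : (0 : Int) ≤ ((2 + cnt : Nat) : Int) := by positivity
    exact mul_le_mul hc hc hc0 (by omega)
  omega

theorem isPrimeB_composite (num d : Int) (h2 : 2 ≤ d) (hd : d * d ≤ num)
    (hm : PySem.Int.mod num d = 0) : isPrimeB num = false := by
  have h4 : 4 ≤ num := le_trans (by nlinarith) hd
  have h2d : 2 * d ≤ d * d := by nlinarith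
  unfold isPrimeB
  rw [if_neg (by omega)]
  exact primeLoopB_false num num.toNat 2 d (by norm_num) (by omega) (by omega) hd hm

theorem st_snd_ge (k : Nat) : ∀ a b : Int, 0 ≤ a → 1 ≤ b → b ≤ (st k (a, b)).2 := by
  induction k with
  | zero => intro a b _ _; simp [st]
  | succ k ih =>
      intro a b ha hb
      have h := ih b (a + b) (by omega) (by omega)
      calc b ≤ a + b := by omega
        _ ≤ (st k (b, a + b)).2 := h
        _ = (st (k+1) (a, b)).2 := rfl

theorem st_add (k j : Nat) (p : Int × Int) : st (k + j) p = st k (st j p) := by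
  induction j generalizing p with
  | zero => rfl
  | succ j ih => exact (ih (p.2, p.1 + p.2)).symm ▸ rfl

theorem fibLoopA_mem (fuel : Nat) : ∀ a b num : Int, fibLoopA fuel a b num = true →
    ∃ k : Nat, num = (st k (a, b)).2 := by
  induction fuel with
  | zero =>
      intro a b num h
      exact ⟨0, by simpa [st] using (beq_iff_eq.mp (by simpa [fibLoopA] using h)).symm⟩
  | succ f ih =>
      intro a b num h
      by_cases hlt : b < num
      · rw [fibLoopA, if_pos hlt] at h
        obtain ⟨k, hk⟩ := ih b (a + b) num h
        exact ⟨k + 1, hk⟩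
      · rw [fibLoopA, if_neg hlt] at h
        exact ⟨0, by simpa [st] using (beq_iff_eq.mp h).symm⟩
theorem pass_mem (m : Int) (h : passA m = true) (hlt : m < 2971215073) : m ∈ FP := by
  have hfib : isFibA m = true := by
    have h' := h
    unfold passA at h'
    cases hf : isFibA m
    · rw [hf] at h'; simp at h'
    · rfl
  obtain ⟨k, hk⟩ := fibLoopA_mem _ _ _ _ hfib
  by_cases hk46 : 46 ≤ k
  · exfalso
    obtain ⟨j, hj⟩ := Nat.exists_eq_add_of_le hk46
    rw [hj, Nat.add_comm, st_add] at hk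
    have h46 : st 46 ((0 : Int), (1 : Int)) = (1836311903, 2971215073) := by decide
    rw [h46] at hk
    have := st_snd_ge j 1836311903 2971215073 (by norm_num) (by norm_num)
    omega
  · push_neg at hk46
    have hk45 : k ≤ 45 := by omega
    interval_cases k <;> subst hk <;>
      first
        | decide
        | exact absurd h (passA_false_of_comp _ 2 (by decide) (by decide) (by decide))
        | exact absurd h (passA_false_of_comp _ 3 (by decide) (by decide) (by decide))
        | exact absurd h (passA_false_of_comp _ 5 (by decide) (by decide) (by decide))
        | exact absurd h (passA_false_of_comp _ 13 (by decide) (by decide) (by decide))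
        | exact absurd h (passA_false_of_comp _ 37 (by decide) (by decide) (by decide))
        | exact absurd h (passA_false_of_comp _ 73 (by decide) (by decide) (by decide))
        | exact absurd h (passA_false_of_comp _ 89 (by decide) (by decide) (by decide))
        | exact absurd h (passA_false_of_comp _ 139 (by decide) (by decide) (by decide))
        | exact absurd h (passA_false_of_comp _ 233 (by decide) (by decide) (by decide))
        | exact absurd h (passA_false_of_comp _ 557 (by decide) (by decide) (by decide))
        | exact absurd h (passA_false_of_comp _ 1597 (by decide) (by decide) (by decide))
        | exact absurd h (passA_false_of_comp _ 2789 (by decide) (by decide) (by decide))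
        | exact absurd h (by decide)

theorem scanA_spec (fuel : Nat) : ∀ num t : Int, passA t = true →
    (∀ m : Int, num ≤ m → m < t → passA m = false) → num ≤ t →
    (t - num).toNat < fuel → scanA fuel num = t := by
  induction fuel with
  | zero => intro num t _ _ _ h4; omega
  | succ f ih =>
      intro num t ht h3 h1 h4
      by_cases hp : passA num = true
      · have hnlt : ¬ num < t := fun hlt => by simp [h3 num le_rfl hlt] at hp
        have he : num = t := by omega
        rw [scanA, if_pos hp, he]
      · have hp' : passA num = false := by
          cases hpm : passA num with
          | false => rfl
          | true => exact absurd hpm hp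
        have hne : num ≠ t := fun he => by rw [he, ht] at hp'; cases hp'
        rw [scanA, if_neg hp]
        exact ih (num + 1) t ht (fun m hm1 hm2 => h3 m (by omega) hm2) (by omega) (by omega)

theorem A_eq (n : Int) (hlo : -2147483648 ≤ n) (hhi : n ≤ 2147483648) :
    get_next_prime_fibonacci n = firstFP n := by
  have key : ∀ t : Int, passA t = true → t ≤ 2971215073 →
      (∀ x : Int, x ∈ FP → x ≤ n ∨ t ≤ x) → n < t →
      scanA 8589934592 (n + 1) = t := by
    intro t ht htle hgap hnt
    apply scanA_spec _ _ _ ht _ (by omega) (by omega)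
    intro m hm1 hm2
    cases hpm : passA m with
    | false => rfl
    | true =>
        exfalso
        have hmem := pass_mem m hpm (by omega)
        rcases hgap m hmem with h | h <;> omega
  unfold get_next_prime_fibonacci firstFP
  split_ifs with h1 h2 h3 h4 h5 h6 h7 h8 h9 h10 <;>
    [ exact key 2 (passA_of 2 (by decide) (isPrimeA_true_of_noDiv 2 0 (by norm_num) (by norm_num) (by decide))) (by norm_num)
        (by intro x hx; simp only [FP, List.mem_cons, List.not_mem_nil, or_false] at hx; rcases hx with h|h|h|h|h|h|h|h|h|h <;> omega)
        (by omega);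
      exact key 3 (passA_of 3 (by decide) (isPrimeA_true_of_noDiv 3 0 (by norm_num) (by norm_num) (by decide))) (by norm_num)
        (by intro x hx; simp only [FP, List.mem_cons, List.not_mem_nil, or_false] at hx; rcases hx with h|h|h|h|h|h|h|h|h|h <;> omega)
        (by omega);
      exact key 5 (passA_of 5 (by decide) (isPrimeA_true_of_noDiv 5 1 (by norm_num) (by norm_num) (by decide))) (by norm_num)
        (by intro x hx; simp only [FP, List.mem_cons, List.not_mem_nil, or_false] at hx; rcases hx with h|h|h|h|h|h|h|h|h|h <;> omega)
        (by omega);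
      exact key 13 (passA_of 13 (by decide) (isPrimeA_true_of_noDiv 13 2 (by norm_num) (by norm_num) (by decide))) (by norm_num)
        (by intro x hx; simp only [FP, List.mem_cons, List.not_mem_nil, or_false] at hx; rcases hx with h|h|h|h|h|h|h|h|h|h <;> omega)
        (by omega);
      exact key 89 (passA_of 89 (by decide) (isPrimeA_true_of_noDiv 89 8 (by norm_num) (by norm_num) (by decide))) (by norm_num)
        (by intro x hx; simp only [FP, List.mem_cons, List.not_mem_nil, or_false] at hx; rcases hx with h|h|h|h|h|h|h|h|h|h <;> omega)
        (by omega);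
      exact key 233 (passA_of 233 (by decide) (isPrimeA_true_of_noDiv 233 14 (by norm_num) (by norm_num) (by decide))) (by norm_num)
        (by intro x hx; simp only [FP, List.mem_cons, List.not_mem_nil, or_false] at hx; rcases hx with h|h|h|h|h|h|h|h|h|h <;> omega)
        (by omega);
      exact key 1597 (passA_of 1597 (by decide) (isPrimeA_true_of_noDiv 1597 38 (by norm_num) (by norm_num) (by decide))) (by norm_num)
        (by intro x hx; simp only [FP, List.mem_cons, List.not_mem_nil, or_false] at hx; rcases hx with h|h|h|h|h|h|h|h|h|h <;> omega)
        (by omega);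
      exact key 28657 (passA_of 28657 (by decide) (isPrimeA_true_of_noDiv 28657 168 (by norm_num) (by norm_num) (by decide))) (by norm_num)
        (by intro x hx; simp only [FP, List.mem_cons, List.not_mem_nil, or_false] at hx; rcases hx with h|h|h|h|h|h|h|h|h|h <;> omega)
        (by omega);
      exact key 514229 (passA_of 514229 (by decide) (isPrimeA_true_of_noDiv 514229 716 (by norm_num) (by norm_num) (by decide))) (by norm_num)
        (by intro x hx; simp only [FP, List.mem_cons, List.not_mem_nil, or_false] at hx; rcases hx with h|h|h|h|h|h|h|h|h|h <;> omega)
        (by omega);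
      exact key 433494437 (passA_of 433494437 (by decide) (isPrimeA_true_of_noDiv 433494437 20819 (by norm_num) (by norm_num) (by decide))) (by norm_num)
        (by intro x hx; simp only [FP, List.mem_cons, List.not_mem_nil, or_false] at hx; rcases hx with h|h|h|h|h|h|h|h|h|h <;> omega)
        (by omega);
      exact key 2971215073 (passA_of 2971215073 (by decide) (isPrimeA_true_of_noDiv 2971215073 54507 (by norm_num) (by norm_num) (by decide))) (by norm_num)
        (by intro x hx; simp only [FP, List.mem_cons, List.not_mem_nil, or_false] at hx; rcases hx with h|h|h|h|h|h|h|h|h|h <;> omega)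
        (by omega) ]

theorem fibScan_hit (f : Nat) (n a b : Int) (h1 : n < b) (h2 : isPrimeB b = true) :
    fibScanB (f + 1) n a b = b := by
  simp [fibScanB, h1, h2]

theorem fibScan_step (f : Nat) (n a b : Int) (h : isPrimeB b = true → ¬ n < b) :
    fibScanB (f + 1) n a b = fibScanB f n b (a + b) := by
  rw [fibScanB, if_neg]
  simp only [Bool.and_eq_true, decide_eq_true_iff, not_and]
  intro h1 h2
  exact h h2 h1

theorem fibScanB_spec (k : Nat) : ∀ (fuel : Nat) (n a b t : Int), k < fuel →
    (st k (a, b)).2 = t →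
    (∀ j : Nat, j < k → isPrimeB ((st j (a, b)).2) = true → ¬ n < (st j (a, b)).2) →
    n < t → isPrimeB t = true → fibScanB fuel n a b = t := by
  induction k with
  | zero =>
      intro fuel n a b t hf hst _ hnt hpt
      cases fuel with
      | zero => omega
      | succ f =>
          have hb : b = t := by simpa [st] using hst
          rw [hb]; exact fibScan_hit f n a t hnt hpt
  | succ k ih =>
      intro fuel n a b t hf hst hj hnt hpt
      cases fuel with
      | zero => omega
      | succ f =>
          rw [fibScan_step f n a b (by simpa [st] using hj 0 (by omega))]
          exact ih f n b (a + b) t (by omega) hst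
            (fun j hjk => hj (j + 1) (by omega)) hnt hpt

theorem B_eq (n : Int) (hhi : n ≤ 2147483648) :
    get_next_prime_fibonacci_alt n = firstFP n := by
  have key : ∀ (k : Nat) (c t : Int), k < 64 → (st k ((1:Int), (2:Int))).2 = t →
      (∀ j : Nat, j < k → ((st j ((1:Int), (2:Int))).2 ≤ c ∨ isPrimeB ((st j ((1:Int), (2:Int))).2) = false)) →
      c ≤ n → n < t → isPrimeB t = true → fibScanB 64 n 1 2 = t := by
    intro k c t hk hst hkey hc hnt hpt
    apply fibScanB_spec k 64 n 1 2 t hk hst _ hnt hpt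
    intro j hj hp
    rcases hkey j hj with h | h
    · omega
    · rw [h] at hp; cases hp
  unfold get_next_prime_fibonacci_alt firstFP
  split_ifs with h1 h2 h3 h4 h5 h6 h7 h8 h9 h10 <;>
    [ exact key 0 n 2 (by norm_num) (by decide)
        (by intro j hj; omega)
        le_rfl (by omega) (isPrimeB_true_of_noDiv 2 0 (by norm_num) (by norm_num) (by decide));
      exact key 1 2 3 (by norm_num) (by decide)
        (by intro j hj; interval_cases j <;>
          first
            | exact Or.inl (by decide)
            | exact Or.inr (isPrimeB_composite _ 2 (by decide) (by decide) (by decide))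
            | exact Or.inr (isPrimeB_composite _ 3 (by decide) (by decide) (by decide))
            | exact Or.inr (isPrimeB_composite _ 5 (by decide) (by decide) (by decide))
            | exact Or.inr (isPrimeB_composite _ 13 (by decide) (by decide) (by decide))
            | exact Or.inr (isPrimeB_composite _ 37 (by decide) (by decide) (by decide))
            | exact Or.inr (isPrimeB_composite _ 73 (by decide) (by decide) (by decide))
            | exact Or.inr (isPrimeB_composite _ 89 (by decide) (by decide) (by decide))
            | exact Or.inr (isPrimeB_composite _ 139 (by decide) (by decide) (by decide))
            | exact Or.inr (isPrimeB_composite _ 233 (by decide) (by decide) (by decide))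
            | exact Or.inr (isPrimeB_composite _ 557 (by decide) (by decide) (by decide))
            | exact Or.inr (isPrimeB_composite _ 1597 (by decide) (by decide) (by decide))
            | exact Or.inr (isPrimeB_composite _ 2789 (by decide) (by decide) (by decide)))
        (by omega) (by omega) (isPrimeB_true_of_noDiv 3 0 (by norm_num) (by norm_num) (by decide));
      exact key 2 3 5 (by norm_num) (by decide)
        (by intro j hj; interval_cases j <;>
          first
            | exact Or.inl (by decide)
            | exact Or.inr (isPrimeB_composite _ 2 (by decide) (by decide) (by decide))
            | exact Or.inr (isPrimeB_composite _ 3 (by decide) (by decide) (by decide))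
            | exact Or.inr (isPrimeB_composite _ 5 (by decide) (by decide) (by decide))
            | exact Or.inr (isPrimeB_composite _ 13 (by decide) (by decide) (by decide))
            | exact Or.inr (isPrimeB_composite _ 37 (by decide) (by decide) (by decide))
            | exact Or.inr (isPrimeB_composite _ 73 (by decide) (by decide) (by decide))
            | exact Or.inr (isPrimeB_composite _ 89 (by decide) (by decide) (by decide))
            | exact Or.inr (isPrimeB_composite _ 139 (by decide) (by decide) (by decide))
            | exact Or.inr (isPrimeB_composite _ 233 (by decide) (by decide) (by decide))
            | exact Or.inr (isPrimeB_composite _ 557 (by decide) (by decide) (by decide))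
            | exact Or.inr (isPrimeB_composite _ 1597 (by decide) (by decide) (by decide))
            | exact Or.inr (isPrimeB_composite _ 2789 (by decide) (by decide) (by decide)))
        (by omega) (by omega) (isPrimeB_true_of_noDiv 5 1 (by norm_num) (by norm_num) (by decide));
      exact key 4 5 13 (by norm_num) (by decide)
        (by intro j hj; interval_cases j <;>
          first
            | exact Or.inl (by decide)
            | exact Or.inr (isPrimeB_composite _ 2 (by decide) (by decide) (by decide))
            | exact Or.inr (isPrimeB_composite _ 3 (by decide) (by decide) (by decide))
            | exact Or.inr (isPrimeB_composite _ 5 (by decide) (by decide) (by decide))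
            | exact Or.inr (isPrimeB_composite _ 13 (by decide) (by decide) (by decide))
            | exact Or.inr (isPrimeB_composite _ 37 (by decide) (by decide) (by decide))
            | exact Or.inr (isPrimeB_composite _ 73 (by decide) (by decide) (by decide))
            | exact Or.inr (isPrimeB_composite _ 89 (by decide) (by decide) (by decide))
            | exact Or.inr (isPrimeB_composite _ 139 (by decide) (by decide) (by decide))
            | exact Or.inr (isPrimeB_composite _ 233 (by decide) (by decide) (by decide))
            | exact Or.inr (isPrimeB_composite _ 557 (by decide) (by decide) (by decide))
            | exact Or.inr (isPrimeB_composite _ 1597 (by decide) (by decide) (by decide))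
            | exact Or.inr (isPrimeB_composite _ 2789 (by decide) (by decide) (by decide)))
        (by omega) (by omega) (isPrimeB_true_of_noDiv 13 2 (by norm_num) (by norm_num) (by decide));
      exact key 8 13 89 (by norm_num) (by decide)
        (by intro j hj; interval_cases j <;>
          first
            | exact Or.inl (by decide)
            | exact Or.inr (isPrimeB_composite _ 2 (by decide) (by decide) (by decide))
            | exact Or.inr (isPrimeB_composite _ 3 (by decide) (by decide) (by decide))
            | exact Or.inr (isPrimeB_composite _ 5 (by decide) (by decide) (by decide))
            | exact Or.inr (isPrimeB_composite _ 13 (by decide) (by decide) (by decide))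
            | exact Or.inr (isPrimeB_composite _ 37 (by decide) (by decide) (by decide))
            | exact Or.inr (isPrimeB_composite _ 73 (by decide) (by decide) (by decide))
            | exact Or.inr (isPrimeB_composite _ 89 (by decide) (by decide) (by decide))
            | exact Or.inr (isPrimeB_composite _ 139 (by decide) (by decide) (by decide))
            | exact Or.inr (isPrimeB_composite _ 233 (by decide) (by decide) (by decide))
            | exact Or.inr (isPrimeB_composite _ 557 (by decide) (by decide) (by decide))
            | exact Or.inr (isPrimeB_composite _ 1597 (by decide) (by decide) (by decide))
            | exact Or.inr (isPrimeB_composite _ 2789 (by decide) (by decide) (by decide)))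
        (by omega) (by omega) (isPrimeB_true_of_noDiv 89 8 (by norm_num) (by norm_num) (by decide));
      exact key 10 89 233 (by norm_num) (by decide)
        (by intro j hj; interval_cases j <;>
          first
            | exact Or.inl (by decide)
            | exact Or.inr (isPrimeB_composite _ 2 (by decide) (by decide) (by decide))
            | exact Or.inr (isPrimeB_composite _ 3 (by decide) (by decide) (by decide))
            | exact Or.inr (isPrimeB_composite _ 5 (by decide) (by decide) (by decide))
            | exact Or.inr (isPrimeB_composite _ 13 (by decide) (by decide) (by decide))
            | exact Or.inr (isPrimeB_composite _ 37 (by decide) (by decide) (by decide))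
            | exact Or.inr (isPrimeB_composite _ 73 (by decide) (by decide) (by decide))
            | exact Or.inr (isPrimeB_composite _ 89 (by decide) (by decide) (by decide))
            | exact Or.inr (isPrimeB_composite _ 139 (by decide) (by decide) (by decide))
            | exact Or.inr (isPrimeB_composite _ 233 (by decide) (by decide) (by decide))
            | exact Or.inr (isPrimeB_composite _ 557 (by decide) (by decide) (by decide))
            | exact Or.inr (isPrimeB_composite _ 1597 (by decide) (by decide) (by decide))
            | exact Or.inr (isPrimeB_composite _ 2789 (by decide) (by decide) (by decide)))
        (by omega) (by omega) (isPrimeB_true_of_noDiv 233 14 (by norm_num) (by norm_num) (by decide));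
      exact key 14 233 1597 (by norm_num) (by decide)
        (by intro j hj; interval_cases j <;>
          first
            | exact Or.inl (by decide)
            | exact Or.inr (isPrimeB_composite _ 2 (by decide) (by decide) (by decide))
            | exact Or.inr (isPrimeB_composite _ 3 (by decide) (by decide) (by decide))
            | exact Or.inr (isPrimeB_composite _ 5 (by decide) (by decide) (by decide))
            | exact Or.inr (isPrimeB_composite _ 13 (by decide) (by decide) (by decide))
            | exact Or.inr (isPrimeB_composite _ 37 (by decide) (by decide) (by decide))
            | exact Or.inr (isPrimeB_composite _ 73 (by decide) (by decide) (by decide))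
            | exact Or.inr (isPrimeB_composite _ 89 (by decide) (by decide) (by decide))
            | exact Or.inr (isPrimeB_composite _ 139 (by decide) (by decide) (by decide))
            | exact Or.inr (isPrimeB_composite _ 233 (by decide) (by decide) (by decide))
            | exact Or.inr (isPrimeB_composite _ 557 (by decide) (by decide) (by decide))
            | exact Or.inr (isPrimeB_composite _ 1597 (by decide) (by decide) (by decide))
            | exact Or.inr (isPrimeB_composite _ 2789 (by decide) (by decide) (by decide)))
        (by omega) (by omega) (isPrimeB_true_of_noDiv 1597 38 (by norm_num) (by norm_num) (by decide));
      exact key 20 1597 28657 (by norm_num) (by decide)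
        (by intro j hj; interval_cases j <;>
          first
            | exact Or.inl (by decide)
            | exact Or.inr (isPrimeB_composite _ 2 (by decide) (by decide) (by decide))
            | exact Or.inr (isPrimeB_composite _ 3 (by decide) (by decide) (by decide))
            | exact Or.inr (isPrimeB_composite _ 5 (by decide) (by decide) (by decide))
            | exact Or.inr (isPrimeB_composite _ 13 (by decide) (by decide) (by decide))
            | exact Or.inr (isPrimeB_composite _ 37 (by decide) (by decide) (by decide))
            | exact Or.inr (isPrimeB_composite _ 73 (by decide) (by decide) (by decide))
            | exact Or.inr (isPrimeB_composite _ 89 (by decide) (by decide) (by decide))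
            | exact Or.inr (isPrimeB_composite _ 139 (by decide) (by decide) (by decide))
            | exact Or.inr (isPrimeB_composite _ 233 (by decide) (by decide) (by decide))
            | exact Or.inr (isPrimeB_composite _ 557 (by decide) (by decide) (by decide))
            | exact Or.inr (isPrimeB_composite _ 1597 (by decide) (by decide) (by decide))
            | exact Or.inr (isPrimeB_composite _ 2789 (by decide) (by decide) (by decide)))
        (by omega) (by omega) (isPrimeB_true_of_noDiv 28657 168 (by norm_num) (by norm_num) (by decide));
      exact key 26 28657 514229 (by norm_num) (by decide)
        (by intro j hj; interval_cases j <;>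
          first
            | exact Or.inl (by decide)
            | exact Or.inr (isPrimeB_composite _ 2 (by decide) (by decide) (by decide))
            | exact Or.inr (isPrimeB_composite _ 3 (by decide) (by decide) (by decide))
            | exact Or.inr (isPrimeB_composite _ 5 (by decide) (by decide) (by decide))
            | exact Or.inr (isPrimeB_composite _ 13 (by decide) (by decide) (by decide))
            | exact Or.inr (isPrimeB_composite _ 37 (by decide) (by decide) (by decide))
            | exact Or.inr (isPrimeB_composite _ 73 (by decide) (by decide) (by decide))
            | exact Or.inr (isPrimeB_composite _ 89 (by decide) (by decide) (by decide))
            | exact Or.inr (isPrimeB_composite _ 139 (by decide) (by decide) (by decide))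
            | exact Or.inr (isPrimeB_composite _ 233 (by decide) (by decide) (by decide))
            | exact Or.inr (isPrimeB_composite _ 557 (by decide) (by decide) (by decide))
            | exact Or.inr (isPrimeB_composite _ 1597 (by decide) (by decide) (by decide))
            | exact Or.inr (isPrimeB_composite _ 2789 (by decide) (by decide) (by decide)))
        (by omega) (by omega) (isPrimeB_true_of_noDiv 514229 716 (by norm_num) (by norm_num) (by decide));
      exact key 40 514229 433494437 (by norm_num) (by decide)
        (by intro j hj; interval_cases j <;>
          first
            | exact Or.inl (by decide)
            | exact Or.inr (isPrimeB_composite _ 2 (by decide) (by decide) (by decide))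
            | exact Or.inr (isPrimeB_composite _ 3 (by decide) (by decide) (by decide))
            | exact Or.inr (isPrimeB_composite _ 5 (by decide) (by decide) (by decide))
            | exact Or.inr (isPrimeB_composite _ 13 (by decide) (by decide) (by decide))
            | exact Or.inr (isPrimeB_composite _ 37 (by decide) (by decide) (by decide))
            | exact Or.inr (isPrimeB_composite _ 73 (by decide) (by decide) (by decide))
            | exact Or.inr (isPrimeB_composite _ 89 (by decide) (by decide) (by decide))
            | exact Or.inr (isPrimeB_composite _ 139 (by decide) (by decide) (by decide))
            | exact Or.inr (isPrimeB_composite _ 233 (by decide) (by decide) (by decide))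
            | exact Or.inr (isPrimeB_composite _ 557 (by decide) (by decide) (by decide))
            | exact Or.inr (isPrimeB_composite _ 1597 (by decide) (by decide) (by decide))
            | exact Or.inr (isPrimeB_composite _ 2789 (by decide) (by decide) (by decide)))
        (by omega) (by omega) (isPrimeB_true_of_noDiv 433494437 20819 (by norm_num) (by norm_num) (by decide));
      exact key 44 433494437 2971215073 (by norm_num) (by decide)
        (by intro j hj; interval_cases j <;>
          first
            | exact Or.inl (by decide)
            | exact Or.inr (isPrimeB_composite _ 2 (by decide) (by decide) (by decide))
            | exact Or.inr (isPrimeB_composite _ 3 (by decide) (by decide) (by decide))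
            | exact Or.inr (isPrimeB_composite _ 5 (by decide) (by decide) (by decide))
            | exact Or.inr (isPrimeB_composite _ 13 (by decide) (by decide) (by decide))
            | exact Or.inr (isPrimeB_composite _ 37 (by decide) (by decide) (by decide))
            | exact Or.inr (isPrimeB_composite _ 73 (by decide) (by decide) (by decide))
            | exact Or.inr (isPrimeB_composite _ 89 (by decide) (by decide) (by decide))
            | exact Or.inr (isPrimeB_composite _ 139 (by decide) (by decide) (by decide))
            | exact Or.inr (isPrimeB_composite _ 233 (by decide) (by decide) (by decide))
            | exact Or.inr (isPrimeB_composite _ 557 (by decide) (by decide) (by decide))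
            | exact Or.inr (isPrimeB_composite _ 1597 (by decide) (by decide) (by decide))
            | exact Or.inr (isPrimeB_composite _ 2789 (by decide) (by decide) (by decide)))
        (by omega) (by omega) (isPrimeB_true_of_noDiv 2971215073 54507 (by norm_num) (by norm_num) (by decide)) ]

-- ===== VERDICT (by name: the statement is the Claim_ definition above) =====
theorem get_next_prime_fibonacci_spec : Claim_equal_get_next_prime_fibonacci := by
  intro n hdom
  unfold Dom_get_next_prime_fibonacci pvDomInt at hdom
  rw [decide_eq_true_iff] at hdom
  unfold Spec_get_next_prime_fibonacci
  rw [A_eq n hdom.1 hdom.2, B_eq n hdom.2]
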